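-- pv_equiv track=rewrite | github.com/vhsw/CodeMasters_Tourney | Python 3/ballsDistribution.py | ballsDistribution
-- ===== SOURCE A (Python) =====
-- def ballsDistribution(colors, ballsPerColor, boxSize):
--
--     currentBox = 0
--     capacity = boxSize
--     result = 0
--
--     for i in range(colors):
--         startBox = currentBox
--         for j in range(ballsPerColor):
--             capacity -= 1
--             if capacity <= 0:
--                 currentBox += 1
--                 capacity = boxSize
--         if startBox < currentBox and capacity < boxSize or startBox + 1 < currentBox:
--             result += 1
--
--     return result
-- ===== SOURCE B (Python) =====
-- def ballsDistribution(colors, ballsPerColor, boxSize):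
--     result = 0
--     for i in range(colors):
--         before = i * ballsPerColor
--         after = before + ballsPerColor
--         startBox = before // boxSize
--         endBox = after // boxSize
--         if (startBox < endBox and after % boxSize != 0) or startBox + 1 < endBox:
--             result += 1
--     return result
-- ===== Notes on version B (the rewrite author's own statement) =====
-- stated objective: faster
-- what changed: B replaces A's per-ball simulation (inner loop over every ball of every color) with O(1) floor-division/modulo arithmetic per color computing each color's start and end box directly; Pre_ restricts to positive boxSize, the task's natural domain, because for boxSize <= 0 A's simulation returns an accidental value (it counts every color with >= 2 balls) while B's division is undefined or meaningless there.
-- outside the precondition, e.g. on ballsDistribution(2, 2, 0): A returns 2, B raises ZeroDivisionError; on ballsDistribution(2, 2, -1): A returns 2, B returns 0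
import Mathlib
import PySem

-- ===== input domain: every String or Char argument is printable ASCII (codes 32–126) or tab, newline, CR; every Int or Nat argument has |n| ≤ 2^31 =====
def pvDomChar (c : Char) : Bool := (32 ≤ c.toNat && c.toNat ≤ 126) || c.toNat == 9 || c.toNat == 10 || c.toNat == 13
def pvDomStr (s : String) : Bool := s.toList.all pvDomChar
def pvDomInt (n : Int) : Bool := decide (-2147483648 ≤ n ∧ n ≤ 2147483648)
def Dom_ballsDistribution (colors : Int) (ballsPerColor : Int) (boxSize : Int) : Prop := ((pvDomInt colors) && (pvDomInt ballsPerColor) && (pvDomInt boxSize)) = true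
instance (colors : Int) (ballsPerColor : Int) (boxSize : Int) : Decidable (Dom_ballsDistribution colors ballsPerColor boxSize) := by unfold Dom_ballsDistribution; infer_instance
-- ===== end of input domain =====

-- B replaces A's ball-by-ball simulation by O(1) division/modulo arithmetic per color (objective: faster).

-- ===== PORT A =====
-- one iteration of A's inner `for j in range(ballsPerColor)` loop
def pvBallStep (boxSize : Int) (bc : Int × Int) (_j : Int) : Int × Int :=
  let cap := bc.2 - 1
  if cap ≤ 0 then (bc.1 + 1, boxSize) else (bc.1, cap)

-- one iteration of A's outer `for i in range(colors)` loop; state = (currentBox, capacity, result)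
def pvColorStep (ballsPerColor boxSize : Int) (st : Int × Int × Int) (_i : Int) : Int × Int × Int :=
  let startBox := st.1
  let inner := (PySem.List.pyRange 0 ballsPerColor 1).foldl (pvBallStep boxSize) (st.1, st.2.1)
  (inner.1, inner.2,
    if (startBox < inner.1 ∧ inner.2 < boxSize) ∨ startBox + 1 < inner.1 then st.2.2 + 1 else st.2.2)

def ballsDistribution (colors : Int) (ballsPerColor : Int) (boxSize : Int) : Int :=
  ((PySem.List.pyRange 0 colors 1).foldl (pvColorStep ballsPerColor boxSize) (0, boxSize, 0)).2.2

-- ===== PORT B =====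
-- one iteration of B's single loop: does color i straddle a box boundary?
def pvAltStep (ballsPerColor boxSize : Int) (r : Int) (i : Int) : Int :=
  let before := i * ballsPerColor
  let after := before + ballsPerColor
  let startBox := PySem.Int.floordiv before boxSize
  let endBox := PySem.Int.floordiv after boxSize
  if (startBox < endBox ∧ PySem.Int.mod after boxSize ≠ 0) ∨ startBox + 1 < endBox then r + 1 else r

def ballsDistribution_alt (colors : Int) (ballsPerColor : Int) (boxSize : Int) : Int :=
  (PySem.List.pyRange 0 colors 1).foldl (pvAltStep ballsPerColor boxSize) 0

-- ===== PRECONDITION & SPEC =====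
-- Pre_ excludes non-positive boxSize (outside the task's natural domain), where A's per-ball
-- simulation returns an accidental value (every color with ≥ 2 balls is counted) and B's
-- division by boxSize raises or is meaningless.
def Pre_ballsDistribution (colors : Int) (ballsPerColor : Int) (boxSize : Int) : Prop := 1 ≤ boxSize
instance (colors : Int) (ballsPerColor : Int) (boxSize : Int) : Decidable (Pre_ballsDistribution colors ballsPerColor boxSize) := by unfold Pre_ballsDistribution; infer_instance
def pvWitness_ballsDistribution : Int × Int × Int := (3, 2, 2)

def Spec_ballsDistribution (colors : Int) (ballsPerColor : Int) (boxSize : Int) (out : Int) : Prop := out = ballsDistribution_alt colors ballsPerColor boxSize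
instance (colors : Int) (ballsPerColor : Int) (boxSize : Int) (out : Int) : Decidable (Spec_ballsDistribution colors ballsPerColor boxSize out) := by unfold Spec_ballsDistribution; infer_instance

-- ===== CLAIM (what is proved, stated in full; the proofs are below) =====
def Claim_equal_ballsDistribution : Prop := ∀ (colors : Int) (ballsPerColor : Int) (boxSize : Int), Dom_ballsDistribution colors ballsPerColor boxSize → Pre_ballsDistribution colors ballsPerColor boxSize → Spec_ballsDistribution colors ballsPerColor boxSize (ballsDistribution colors ballsPerColor boxSize)

-- ===== LEMMAS AND PROOFS =====

-- capacity after k balls have been placed (boxSize = s > 0)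
def capOf (s k : Int) : Int := if k % s = 0 then s else s - k % s

theorem ballStep_char (s k : Int) (hs : 0 < s) (j : Int) :
    pvBallStep s (k / s, capOf s k) j = ((k + 1) / s, capOf s (k + 1)) := by
  have hne : s ≠ 0 := by omega
  have hm0 := Int.emod_nonneg k hne
  have hmlt := Int.emod_lt_of_pos k hs
  have hk1 := Int.mul_ediv_add_emod k s
  have hk2 := Int.mul_ediv_add_emod (k + 1) s
  have hadd : (k + 1) % s = (k % s + 1) % s := by
    conv_lhs => rw [← hk1]
    rw [show s * (k / s) + k % s + 1 = k % s + 1 + s * (k / s) by ring,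
      Int.add_mul_emod_self_left]
  by_cases hr : k % s = s - 1
  · have hm : (k + 1) % s = 0 := by
      rw [hadd, hr, show s - 1 + 1 = s by ring, Int.emod_self]
    have hd : (k + 1) / s = k / s + 1 := by
      refine mul_left_cancel₀ hne ?_
      rw [mul_add, mul_one]
      rw [hm] at hk2
      linarith
    clear hk1 hk2 hadd
    simp only [pvBallStep, capOf, hd, hm]
    split_ifs <;> simp only [Prod.mk.injEq] <;> omega
  · have hm : (k + 1) % s = k % s + 1 := by
      rw [hadd]; exact Int.emod_eq_of_lt (by omega) (by omega)
    have hd : (k + 1) / s = k / s := by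
      refine mul_left_cancel₀ hne ?_
      rw [hm] at hk2
      linarith
    clear hk1 hk2 hadd
    simp only [pvBallStep, capOf, hd, hm]
    split_ifs <;> simp only [Prod.mk.injEq, true_and, and_true] <;> omega

theorem innerFold_char (s : Int) (hs : 0 < s) (m : Nat) (k : Int) :
    (PySem.List.pyRange 0 (m : Int) 1).foldl (pvBallStep s) (k / s, capOf s k)
      = ((k + m) / s, capOf s (k + m)) := by
  induction m with
  | zero => simp [PySem.List.pyRange_one_eq_nil le_rfl]
  | succ m ih =>
      have h1 : ((m + 1 : Nat) : Int) = (m : Int) + 1 := by push_cast; ring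
      rw [h1, PySem.List.pyRange_one_succ_right (by positivity), List.foldl_append]
      simp only [List.foldl_cons, List.foldl_nil, ih]
      rw [ballStep_char s (k + m) hs]
      ring_nf

theorem capOf_lt_iff (s K : Int) (hs : 0 < s) : capOf s K < s ↔ K % s ≠ 0 := by
  have h1 := Int.emod_nonneg K (by omega : s ≠ 0)
  unfold capOf; split_ifs <;> omega

theorem innerFold_char' (s b : Int) (hs : 0 < s) (hb : 0 ≤ b) (k : Int) :
    (PySem.List.pyRange 0 b 1).foldl (pvBallStep s) (k / s, capOf s k)
      = ((k + b) / s, capOf s (k + b)) := by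
  obtain ⟨m, rfl⟩ : ∃ m : Nat, b = (m : Int) := ⟨b.toNat, (Int.toNat_of_nonneg hb).symm⟩
  exact innerFold_char s hs m k

theorem outerFold_char (s b : Int) (hs : 0 < s) (hb : 0 < b) (n : Nat) :
    (PySem.List.pyRange 0 (n : Int) 1).foldl (pvColorStep b s) (0, s, 0)
      = ((n * b) / s, capOf s (n * b),
         (PySem.List.pyRange 0 (n : Int) 1).foldl (pvAltStep b s) 0) := by
  induction n with
  | zero => simp [PySem.List.pyRange_one_eq_nil le_rfl, capOf]
  | succ n ih =>
      have h1 : ((n + 1 : Nat) : Int) = (n : Int) + 1 := by push_cast; ring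
      rw [h1, PySem.List.pyRange_one_succ_right (by positivity), List.foldl_append,
        List.foldl_append, ih]
      simp only [List.foldl_cons, List.foldl_nil]
      have hinner : (PySem.List.pyRange 0 b 1).foldl (pvBallStep s) ((n * b) / s, capOf s (n * b))
          = ((((n:Int) + 1) * b) / s, capOf s (((n:Int) + 1) * b)) := by
        rw [innerFold_char' s b hs hb.le ((n:Int) * b)]
        ring_nf
      simp only [pvColorStep, pvAltStep, hinner]
      have hcond : ((n:Int) * b / s < ((n:Int) + 1) * b / s ∧ capOf s (((n:Int) + 1) * b) < s)
            ∨ (n:Int) * b / s + 1 < ((n:Int) + 1) * b / s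
          ↔ (PySem.Int.floordiv ((n:Int) * b) s < PySem.Int.floordiv ((n:Int) * b + b) s
              ∧ PySem.Int.mod ((n:Int) * b + b) s ≠ 0)
            ∨ PySem.Int.floordiv ((n:Int) * b) s + 1 < PySem.Int.floordiv ((n:Int) * b + b) s := by
        rw [PySem.Int.floordiv_eq_ediv_of_pos hs, PySem.Int.floordiv_eq_ediv_of_pos hs,
          PySem.Int.mod_eq_emod_of_pos hs, capOf_lt_iff s _ hs,
          show (n:Int) * b + b = ((n:Int) + 1) * b by ring]
      rw [if_congr hcond rfl rfl]

theorem foldl_state_id {α β : Type} (l : List β) (init : α) :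
    l.foldl (fun st (_ : β) => st) init = init := by
  induction l generalizing init with
  | nil => rfl
  | cons x l ih => simp only [List.foldl_cons]; exact ih init

theorem colorStep_of_nonpos_balls (b s : Int) (hb : b ≤ 0) :
    pvColorStep b s = fun st _ => st := by
  funext st i
  simp only [pvColorStep, PySem.List.pyRange_one_eq_nil hb, List.foldl_nil]
  rw [if_neg (by omega)]

theorem altStep_of_nonpos_balls (b s : Int) (hs : 0 < s) (hb : b ≤ 0) :
    pvAltStep b s = fun r _ => r := by
  funext r i
  simp only [pvAltStep]
  have hle : i * b + b ≤ i * b := by omega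
  have hdiv : (i * b + b) / s ≤ (i * b) / s := Int.ediv_le_ediv hs hle
  rw [PySem.Int.floordiv_eq_ediv_of_pos hs, PySem.Int.floordiv_eq_ediv_of_pos hs]
  rw [if_neg (by omega)]

-- ===== VERDICT (by name: the statement is the Claim_ definition above) =====
theorem ballsDistribution_spec : Claim_equal_ballsDistribution := by
  intro c b s _dom hpre
  have hs : (0:Int) < s := hpre
  unfold Spec_ballsDistribution ballsDistribution ballsDistribution_alt
  by_cases hc : c ≤ 0
  · rw [PySem.List.pyRange_one_eq_nil hc]; rfl
  · replace hc : (0:Int) < c := by omega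
    have hcn : c = ((c.toNat : Int)) := (Int.toNat_of_nonneg hc.le).symm
    by_cases hb : b ≤ 0
    · rw [colorStep_of_nonpos_balls b s hb, foldl_state_id,
        altStep_of_nonpos_balls b s hs hb, foldl_state_id]
    · replace hb : (0:Int) < b := by omega
      rw [hcn, outerFold_char s b hs hb c.toNat]
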